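-- pv_equiv track=rewrite | github.com/anyakul/python | gb_tasks/task036_GrowingNums/program.py | get_growing_nums
-- ===== SOURCE A (Python) =====
-- def get_growing_nums(lst):
--     res = []
--     count = 0
--     res.append(lst[count])
--
--     for i in lst:
--         if i > res[count]:
--             res.append(i)
--             count += 1
--
--     return res
-- ===== SOURCE B (Python) =====
-- def get_growing_nums(lst):
--     # two passes: prefix-maximum table, then pick records by adjacent comparison
--     pm = [lst[0]]
--     for x in lst[1:]:
--         pm.append(x if x > pm[-1] else pm[-1])
--     return [lst[0]] + [b for a, b in zip(pm, pm[1:]) if b > a]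
-- ===== Notes on version B (the rewrite author's own statement) =====
-- stated objective: alternative
-- what changed: B replaces A's single greedy pass that appends while tracking the last-record index with a two-pass table scheme: it first builds a prefix-maximum table, then emits exactly the positions where that table strictly increases, via a zip of adjacent table entries.
import Mathlib
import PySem

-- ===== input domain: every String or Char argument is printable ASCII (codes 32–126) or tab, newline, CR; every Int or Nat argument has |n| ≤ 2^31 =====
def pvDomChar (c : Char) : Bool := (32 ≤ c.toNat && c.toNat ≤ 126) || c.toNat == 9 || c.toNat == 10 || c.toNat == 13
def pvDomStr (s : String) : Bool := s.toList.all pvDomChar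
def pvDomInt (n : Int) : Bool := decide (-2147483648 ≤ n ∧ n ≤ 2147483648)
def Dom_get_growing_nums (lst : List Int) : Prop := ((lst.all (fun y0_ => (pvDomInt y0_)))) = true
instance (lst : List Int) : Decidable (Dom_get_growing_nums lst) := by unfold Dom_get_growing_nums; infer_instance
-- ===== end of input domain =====

-- B replaces A's single greedy record pass by a two-pass scheme (prefix-maximum table, then
-- adjacent-comparison filter); same cost, different decomposition. Pre_ excludes only the empty
-- list, where the Python A raises IndexError indexing the first element.


-- ===== PORT A =====
-- res = []; count = 0; res.append(lst[count]); for i in lst: if i > res[count]: res.append(i); count += 1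
def get_growing_nums (lst : List Int) : List Int :=
  match PySem.List.pyGet? lst 0 with
  | none => []          -- IndexError on the empty list; excluded by Pre_
  | some h =>
    (lst.foldl (fun (st : List Int × Int) i =>
        match PySem.List.pyGet? st.1 st.2 with
        | none => st    -- unreachable: count always indexes the last element of res
        | some last => if i > last then (st.1 ++ [i], st.2 + 1) else st)
      ([h], 0)).1

-- ===== PORT B =====
-- pm = [lst[0]]; for x in lst[1:]: pm.append(x if x > pm[-1] else pm[-1])
-- return [lst[0]] + [b for a, b in zip(pm, pm[1:]) if b > a]
def get_growing_nums_alt (lst : List Int) : List Int :=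
  match lst with
  | [] => []            -- IndexError on the empty list; excluded by Pre_
  | h :: t =>
    let pm := t.foldl (fun pm x =>
        pm ++ [match PySem.List.pyGet? pm (-1) with
               | none => x          -- unreachable: pm is never empty
               | some last => if x > last then x else last]) [h]
    h :: ((pm.zip (pm.drop 1)).filterMap fun ab => if ab.2 > ab.1 then some ab.2 else none)

-- ===== PRECONDITION & SPEC =====
-- A evaluates lst[0] and raises IndexError on the empty list; Pre_ excludes exactly that input.
def Pre_get_growing_nums (lst : List Int) : Prop := lst ≠ []
instance (lst : List Int) : Decidable (Pre_get_growing_nums lst) := by unfold Pre_get_growing_nums; infer_instance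
def pvWitness_get_growing_nums : List Int := [3, 1, 4, 4, 5]
def Spec_get_growing_nums (lst : List Int) (out : List Int) : Prop := out = get_growing_nums_alt lst
instance (lst : List Int) (out : List Int) : Decidable (Spec_get_growing_nums lst out) := by unfold Spec_get_growing_nums; infer_instance

-- ===== CLAIM (what is proved, stated in full; the proofs are below) =====
def Claim_equal_get_growing_nums : Prop := ∀ (lst : List Int), Dom_get_growing_nums lst → Pre_get_growing_nums lst → Spec_get_growing_nums lst (get_growing_nums lst)

-- ===== LEMMAS AND PROOFS =====

-- the common value: strict running-maximum records of xs above m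
def pvCore (m : Int) : List Int → List Int
  | [] => []
  | x :: t => if x > m then x :: pvCore x t else pvCore m t

-- the prefix-maximum tail produced by B's first loop
def pvPms (m : Int) : List Int → List Int
  | [] => []
  | x :: t => (if x > m then x else m) :: pvPms (if x > m then x else m) t

theorem pvA_loop (xs : List Int) : ∀ (res : List Int) (m : Int),
    (xs.foldl (fun (st : List Int × Int) i =>
        match PySem.List.pyGet? st.1 st.2 with
        | none => st
        | some last => if i > last then (st.1 ++ [i], st.2 + 1) else st)
      (res ++ [m], (res.length : Int))).1 = res ++ [m] ++ pvCore m xs := by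
  induction xs with
  | nil => intro res m; simp [List.foldl, pvCore]
  | cons x t ih =>
    intro res m
    simp only [List.foldl]
    rw [PySem.List.pyGet?_append_length]
    by_cases hx : x > m
    · dsimp only
      rw [if_pos hx,
        show (res ++ [m] ++ [x], (res.length : Int) + 1)
           = ((res ++ [m]) ++ [x], ((res ++ [m]).length : Int)) by simp,
        ih (res ++ [m]) x]
      simp [pvCore, hx]
    · dsimp only
      rw [if_neg hx, ih res m]
      simp [pvCore, hx]

theorem pvB_loop (t : List Int) : ∀ (pm : List Int) (m : Int),
    (t.foldl (fun pm x =>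
        pm ++ [match PySem.List.pyGet? pm (-1) with
               | none => x
               | some last => if x > last then x else last]) (pm ++ [m]))
    = pm ++ [m] ++ pvPms m t := by
  induction t with
  | nil => intro pm m; simp [List.foldl, pvPms]
  | cons x t ih =>
    intro pm m
    simp only [List.foldl]
    rw [PySem.List.pyGet?_neg_one_append_singleton,
      show (pm ++ [m]) ++ [if x > m then x else m]
         = (pm ++ [m]) ++ [if x > m then x else m] from rfl,
      ih (pm ++ [m]) (if x > m then x else m)]
    simp [pvPms]

-- the adjacent-comparison filter of (m :: pvPms m t) is exactly pvCore m t
theorem pvAdj (t : List Int) : ∀ (m : Int),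
    (((m :: pvPms m t).zip ((m :: pvPms m t).drop 1)).filterMap
      fun ab => if ab.2 > ab.1 then some ab.2 else none) = pvCore m t := by
  induction t with
  | nil => intro m; simp [pvPms, pvCore]
  | cons x t ih =>
    intro m
    have hrec := ih (if x > m then x else m)
    by_cases hx : x > m
    · rw [if_pos hx] at hrec
      simp only [pvPms, if_pos hx, List.drop_succ_cons, List.drop_zero,
        List.zip_cons_cons, List.filterMap_cons, pvCore] at hrec ⊢
      simp [hrec]
    · rw [if_neg hx] at hrec
      simp only [pvPms, if_neg hx, List.drop_succ_cons, List.drop_zero,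
        List.zip_cons_cons, List.filterMap_cons, pvCore] at hrec ⊢
      simp [hrec]

-- ===== VERDICT (by name: the statement is the Claim_ definition above) =====
theorem get_growing_nums_spec : Claim_equal_get_growing_nums := by
  intro lst _ hpre
  match lst, hpre with
  | h :: t, _ =>
    unfold Spec_get_growing_nums get_growing_nums get_growing_nums_alt
    rw [PySem.List.pyGet?_zero_cons]
    dsimp only
    have hA := pvA_loop (h :: t) [] h
    simp only [List.nil_append, List.length_nil, Int.ofNat_zero] at hA
    have hB := pvB_loop t [] h
    simp only [List.nil_append] at hB
    rw [hA, hB]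
    rw [show pvCore h (h :: t) = pvCore h t by
      rw [pvCore, if_neg (lt_irrefl h)]]
    exact congrArg (h :: ·) (pvAdj t h).symm
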